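-- pv_equiv track=rewrite | github.com/datasets/airport-codes | .env/lib/python3.12/site-packages/dataflows/processors/join.py | order_fields
-- ===== SOURCE A (Python) =====
-- import collections
--
-- def order_fields(fields, schema_fields):
--     ordered_fields = collections.OrderedDict()
--     for descriptor in schema_fields:
--         name = descriptor['name']
--         if name in fields:
--             ordered_fields[name] = fields.pop(name)
--     for name in sorted(fields.keys()):
--         ordered_fields[name] = fields[name]
--     return ordered_fields
-- ===== SOURCE B (Python) =====
-- import collections
--
--
-- def order_fields(fields, schema_fields):
--     # Build a first-occurrence index of the schema names once, then order all
--     # keys with a single sort whose key places schema names first (by schema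
--     # position) and the remaining names after them (alphabetically).
--     # Like the original, schema-named entries are popped out of `fields`.
--     index = {}
--     for i, descriptor in enumerate(schema_fields):
--         index.setdefault(descriptor['name'], i)
--     k = len(schema_fields)
--     result = collections.OrderedDict()
--     for name in sorted(fields.keys(), key=lambda n: (index.get(n, k), n)):
--         result[name] = fields.pop(name) if name in index else fields[name]
--     return result
-- ===== Notes on version B (the rewrite author's own statement) =====
-- stated objective: alternative
-- what changed: Replaces A's two output passes (schema loop over descriptors popping matches, then a sorted pass over the leftovers) by building a first-occurrence index of schema names once and emitting all keys in a single sort whose key orders schema names by schema position and the rest alphabetically.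
import Mathlib
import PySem

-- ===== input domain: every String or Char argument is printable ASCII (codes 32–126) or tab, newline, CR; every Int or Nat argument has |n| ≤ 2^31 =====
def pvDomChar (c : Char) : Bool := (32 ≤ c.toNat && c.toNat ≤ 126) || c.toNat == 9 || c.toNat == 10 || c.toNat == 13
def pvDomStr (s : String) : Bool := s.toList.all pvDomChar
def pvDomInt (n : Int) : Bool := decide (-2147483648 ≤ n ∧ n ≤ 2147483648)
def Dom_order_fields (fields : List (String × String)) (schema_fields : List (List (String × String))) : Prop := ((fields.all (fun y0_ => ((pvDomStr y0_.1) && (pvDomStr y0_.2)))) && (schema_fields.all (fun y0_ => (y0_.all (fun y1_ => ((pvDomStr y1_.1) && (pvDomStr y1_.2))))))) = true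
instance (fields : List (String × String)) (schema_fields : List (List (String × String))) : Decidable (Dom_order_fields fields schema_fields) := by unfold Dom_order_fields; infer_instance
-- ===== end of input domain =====

-- B builds a first-occurrence index of the schema names once and orders all keys with a single
-- sort (schema names first, by schema position, then the rest alphabetically) instead of A's two
-- separate output passes; the proved equality is about the return value (both versions also pop
-- the schema-named keys out of the `fields` dict argument in the same way).

-- ===== PORT A =====
-- descriptor['name']: a missing 'name' key raises KeyError in Python — excluded by Pre_, where getD is exact
def pvName (descriptor : List (String × String)) : String :=
  PySem.Dict.getD (PySem.Dict.mk descriptor) "name" ""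

def order_fields (fields : List (String × String)) (schema_fields : List (List (String × String))) : List (String × String) :=
  let st := schema_fields.foldl
    (fun (st : PySem.Dict String String × PySem.Dict String String) descriptor =>
      let name := pvName descriptor
      if st.2.contains name then
        match st.2.pop? name with
        | some (v, rest) => (st.1.insert name v, rest)
        | none => st
      else st)
    (PySem.Dict.empty, PySem.Dict.mk fields)
  ((PySem.List.sorted st.2.keys (fun n => n) false).foldl
    (fun od n => od.insert n (st.2.getD n "")) st.1).items

-- ===== PORT B =====
def order_fields_alt (fields : List (String × String)) (schema_fields : List (List (String × String))) : List (String × String) :=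
  let index : PySem.Dict String Int := (PySem.List.enumerate schema_fields).foldl
    (fun d p => d.setdefault (pvName p.2) p.1) PySem.Dict.empty
  let k : Int := Int.ofNat schema_fields.length
  let fd := PySem.Dict.mk fields
  let st := (PySem.List.sorted2 fd.keys (fun n => index.getD n k) (fun n => n) false).foldl
    (fun (st : PySem.Dict String String × PySem.Dict String String) n =>
      if index.contains n then
        match st.2.pop? n with
        | some (v, rest) => (st.1.insert n v, rest)
        | none => st
      else (st.1.insert n (st.2.getD n ""), st.2))
    (PySem.Dict.empty, fd)
  st.1.items

-- ===== PRECONDITION & SPEC =====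
-- Pre_ excludes (a) fields lists with duplicate keys, which do not represent any Python dict
-- (a dict never has them), and (b) schema descriptors without a 'name' key, on which A raises KeyError.
def Pre_order_fields (fields : List (String × String)) (schema_fields : List (List (String × String))) : Prop :=
  (fields.map Prod.fst).Nodup ∧ ∀ d ∈ schema_fields, "name" ∈ d.map Prod.fst
instance (fields : List (String × String)) (schema_fields : List (List (String × String))) : Decidable (Pre_order_fields fields schema_fields) := by unfold Pre_order_fields; infer_instance

def pvWitness_order_fields : (List (String × String)) × (List (List (String × String))) :=
  ([("b", "2"), ("a", "1")], [[("name", "a")]])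

def Spec_order_fields (fields : List (String × String)) (schema_fields : List (List (String × String))) (out : List (String × String)) : Prop := out = order_fields_alt fields schema_fields
instance (fields : List (String × String)) (schema_fields : List (List (String × String))) (out : List (String × String)) : Decidable (Spec_order_fields fields schema_fields out) := by unfold Spec_order_fields; infer_instance

-- ===== CLAIM (what is proved, stated in full; the proofs are below) =====
def Claim_equal_order_fields : Prop := ∀ (fields : List (String × String)) (schema_fields : List (List (String × String))), Dom_order_fields fields schema_fields → Pre_order_fields fields schema_fields → Spec_order_fields fields schema_fields (order_fields fields schema_fields)

-- ===== LEMMAS AND PROOFS =====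

-- A's loop step, on the extracted name
def popStep (st : PySem.Dict String String × PySem.Dict String String) (n : String) :
    PySem.Dict String String × PySem.Dict String String :=
  if st.2.contains n then
    match st.2.pop? n with
    | some (v, rest) => (st.1.insert n v, rest)
    | none => st
  else st

-- B's loop step
def bStep (index : PySem.Dict String Int) (st : PySem.Dict String String × PySem.Dict String String)
    (n : String) : PySem.Dict String String × PySem.Dict String String :=
  if index.contains n then
    match st.2.pop? n with
    | some (v, rest) => (st.1.insert n v, rest)
    | none => st
  else (st.1.insert n (st.2.getD n ""), st.2)

-- what A computes, written as a recursion over the schema names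
def chain (rem : PySem.Dict String String) : List String → List (String × String)
  | [] => (PySem.List.sorted rem.keys (fun n => n) false).map (fun n => (n, rem.getD n ""))
  | n :: S => if rem.contains n then (n, rem.getD n "") :: chain (rem.erase n) S else chain rem S

-- index of the first occurrence of n in S (length of S if absent)
def firstIdx (S : List String) (n : String) : Int :=
  match PySem.List.index? S n with
  | some j => (j : Int)
  | none => (S.length : Int)

def lexKey (S : List String) (n : String) : Int ×ₗ String := toLex (firstIdx S n, n)

theorem keys_erase_dict (d : PySem.Dict String String) (k : String) :
    (d.erase k).keys = d.keys.filter (fun x => !(x == k)) := by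
  cases d with
  | mk items =>
    simp only [PySem.Dict.erase, PySem.Dict.keys]
    induction items with
    | nil => rfl
    | cons p t ih =>
      by_cases h : p.1 = k
      · simp [List.filter_cons, h, ih]
      · simp [List.filter_cons, h, ih]

theorem get?_erase_of_ne (d : PySem.Dict String String) {m k : String} (h : m ≠ k) :
    (d.erase k).get? m = d.get? m := by
  cases d with
  | mk items =>
    induction items with
    | nil => rfl
    | cons p t ih =>
      obtain ⟨a, b⟩ := p
      have hrec : ({ items := List.filter (fun p => !(p.1 == k)) t } : PySem.Dict String String).get? m
          = ({ items := t } : PySem.Dict String String).get? m := by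
        simpa [PySem.Dict.erase] using ih
      by_cases hak : a = k
      · have ham : ¬ (a = m) := by rw [hak]; exact fun hh => h hh.symm
        simp [PySem.Dict.erase, List.filter_cons, hak, PySem.Dict.get?_mk_cons, ham, Ne.symm h, hrec]
      · by_cases ham : a = m
        · simp [PySem.Dict.erase, List.filter_cons, hak, PySem.Dict.get?_mk_cons, ham, h]
        · simp [PySem.Dict.erase, List.filter_cons, hak, PySem.Dict.get?_mk_cons, ham, h, hrec]

theorem get?_erase_self (d : PySem.Dict String String) (k : String) :
    (d.erase k).get? k = none := by
  cases d with
  | mk items =>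
    induction items with
    | nil => rfl
    | cons p t ih =>
      obtain ⟨a, b⟩ := p
      by_cases hak : a = k
      · simpa [PySem.Dict.erase, List.filter_cons, hak] using ih
      · simp [PySem.Dict.erase, List.filter_cons, hak, PySem.Dict.get?_mk_cons] at ih ⊢
        simpa [PySem.Dict.erase] using ih

theorem getD_erase_of_ne (d : PySem.Dict String String) {m k : String} (h : m ≠ k) (d0 : String) :
    (d.erase k).getD m d0 = d.getD m d0 := by
  simp [PySem.Dict.getD_eq_get?_getD, get?_erase_of_ne d h]

theorem contains_erase_of_ne (d : PySem.Dict String String) {m k : String} (h : m ≠ k) :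
    (d.erase k).contains m = d.contains m := by
  rw [PySem.Dict.contains_eq_isSome_get?, PySem.Dict.contains_eq_isSome_get?, get?_erase_of_ne d h]

theorem contains_erase_self (d : PySem.Dict String String) (k : String) :
    (d.erase k).contains k = false := by
  rw [PySem.Dict.contains_eq_isSome_get?, get?_erase_self]; rfl

theorem nodup_keys_erase (d : PySem.Dict String String) (k : String) (h : d.keys.Nodup) :
    (d.erase k).keys.Nodup := by
  rw [keys_erase_dict]; exact h.filter _

theorem pop?_of_contains (d : PySem.Dict String String) {n : String} (h : d.contains n = true) :
    d.pop? n = some (d.getD n "", d.erase n) := by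
  rw [PySem.Dict.contains_eq_isSome_get?] at h
  obtain ⟨v, hv⟩ := Option.isSome_iff_exists.mp h
  simp [PySem.Dict.pop?, hv, PySem.Dict.getD_of_get?_eq_some d "" hv]

theorem index?_append_of_not_mem {v : String} {l : List String} (t : List String) (h : v ∉ l) :
    PySem.List.index? (l ++ t) v = (PySem.List.index? t v).map (· + l.length) := by
  induction l with
  | nil =>
    simp only [List.nil_append]
    cases h2 : PySem.List.index? t v <;> simp [h2]
  | cons x l ih =>
    have hxv : x ≠ v := fun hh => h (hh ▸ List.mem_cons_self ..)
    rw [List.cons_append, PySem.List.index?_cons_of_ne _ hxv,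
      ih (fun hm => h (List.mem_cons_of_mem _ hm))]
    cases PySem.List.index? t v <;> simp <;> omega

theorem idx_get? (sf : List (List (String × String))) (s : Int) (d : PySem.Dict String Int) (n : String) :
    ((PySem.List.enumerate sf s).foldl (fun d p => d.setdefault (pvName p.2) p.1) d).get? n
      = match d.get? n with
        | some v => some v
        | none => (PySem.List.index? (sf.map pvName) n).map (fun j => s + (j : Int)) := by
  induction sf generalizing s d with
  | nil =>
    rw [PySem.List.enumerate_nil]
    cases hd : d.get? n <;> simp [hd]
  | cons x sf ih =>
    rw [PySem.List.enumerate_cons, List.foldl_cons, ih]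
    by_cases hnx : n = pvName x
    · rw [← hnx, PySem.Dict.get?_setdefault_self]
      cases hd : d.get? n with
      | some v => simp [hd]
      | none =>
        simp only [hd, Option.getD_none]
        rw [List.map_cons, ← hnx, PySem.List.index?_cons_self]
        simp
    · rw [PySem.Dict.get?_setdefault_of_ne _ _ hnx]
      cases hd : d.get? n with
      | some v => simp [hd]
      | none =>
        simp only [hd]
        rw [List.map_cons, PySem.List.index?_cons_of_ne _ (fun hh => hnx hh.symm)]
        cases PySem.List.index? (sf.map pvName) n <;> simp <;> omega

theorem k1_eq (sf : List (List (String × String))) :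
    (fun n => ((PySem.List.enumerate sf).foldl (fun d p => d.setdefault (pvName p.2) p.1)
        PySem.Dict.empty).getD n (Int.ofNat sf.length))
      = firstIdx (sf.map pvName) := by
  funext n
  rw [PySem.Dict.getD_eq_get?_getD, idx_get?, PySem.Dict.get?_empty]
  cases hj : PySem.List.index? (sf.map pvName) n with
  | some j => unfold firstIdx; rw [hj]; simp
  | none => unfold firstIdx; rw [hj]; simp

theorem before_eq {α : Type} (k1 : α → Int) (k2 : α → String) (a b : α) :
    (decide (k1 a < k1 b) || (!decide (k1 b < k1 a) && decide (k2 a < k2 b)))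
      = decide (toLex (k1 a, k2 a) < toLex (k1 b, k2 b)) := by
  by_cases h1 : k1 a < k1 b
  · simp [h1, Prod.Lex.toLex_lt_toLex]
  · by_cases h2 : k1 b < k1 a
    · have hne : ¬ (k1 a = k1 b) := by omega
      simp [h1, h2, hne, Prod.Lex.toLex_lt_toLex]
    · have he : k1 a = k1 b := le_antisymm (not_lt.mp h2) (not_lt.mp h1)
      simp [h1, h2, he, Prod.Lex.toLex_lt_toLex]

theorem sorted2_eq_sorted_lex {α : Type} (xs : List α) (k1 : α → Int) (k2 : α → String) :
    PySem.List.sorted2 xs k1 k2 false = PySem.List.sorted xs (fun x => toLex (k1 x, k2 x)) false := by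
  rw [PySem.List.sorted_eq_foldl_insertBy]
  show xs.foldl (fun acc x => PySem.List.insertBy
      (fun a b => decide (k1 a < k1 b) || (!decide (k1 b < k1 a) && decide (k2 a < k2 b))) x acc) []
    = _
  have h : (fun a b => decide (k1 a < k1 b) || (!decide (k1 b < k1 a) && decide (k2 a < k2 b)))
      = (fun a b => decide ((fun x => toLex (k1 x, k2 x)) a < (fun x => toLex (k1 x, k2 x)) b)) := by
    funext a b; exact before_eq k1 k2 a b
  rw [h]

theorem afold_chain (S : List String) (od rem : PySem.Dict String String)
    (hnd : rem.keys.Nodup) (hdisj : ∀ n ∈ rem.keys, od.contains n = false) :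
    ((PySem.List.sorted (S.foldl popStep (od, rem)).2.keys (fun n => n) false).foldl
        (fun o n => o.insert n ((S.foldl popStep (od, rem)).2.getD n "")) (S.foldl popStep (od, rem)).1).items
      = od.items ++ chain rem S := by
  induction S generalizing od rem with
  | nil =>
    simp only [List.foldl_nil]
    have h := PySem.Dict.items_foldl_insert_fresh (PySem.List.sorted rem.keys (fun n => n) false)
      (fun n => n) (fun n => rem.getD n "") od
      (fun a ha => hdisj a ((PySem.List.mem_sorted _ _ _ _).mp ha))
      (by simpa using (PySem.List.sorted_perm rem.keys (fun n => n) false).symm.nodup hnd)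
    simpa [chain] using h
  | cons n S ih =>
    simp only [List.foldl_cons]
    by_cases hc : rem.contains n
    · have hstep : popStep (od, rem) n = (od.insert n (rem.getD n ""), rem.erase n) := by
        simp [popStep, hc, pop?_of_contains rem hc]
      rw [hstep]
      have hnd' := nodup_keys_erase rem n hnd
      have hdisj' : ∀ m ∈ (rem.erase n).keys, (od.insert n (rem.getD n "")).contains m = false := by
        intro m hm
        rw [keys_erase_dict] at hm
        have hmk := List.mem_of_mem_filter hm
        have hmn : ¬ (m = n) := by have := List.of_mem_filter hm; simpa using this
        rw [PySem.Dict.contains_insert]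
        simp [hmn, hdisj m hmk]
      rw [ih (od.insert n (rem.getD n "")) (rem.erase n) hnd' hdisj']
      rw [PySem.Dict.items_insert_of_not_contains _ _
        (hdisj n ((PySem.Dict.contains_iff_mem_keys _ _).mp hc))]
      simp [chain, hc, List.append_assoc]
    · have hstep : popStep (od, rem) n = (od, rem) := by simp [popStep, hc]
      rw [hstep, ih od rem hnd hdisj]
      simp [chain, hc]

theorem bfold_items (index : PySem.Dict String Int) (L : List String)
    (od rem : PySem.Dict String String) (hnd : rem.keys.Nodup) (hL : L.Nodup)
    (hin : ∀ n ∈ L, rem.contains n = true) (hout : ∀ n ∈ L, od.contains n = false) :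
    ((L.foldl (bStep index) (od, rem)).1).items
      = od.items ++ L.map (fun n => (n, rem.getD n "")) := by
  induction L generalizing od rem with
  | nil => simp
  | cons n L ih =>
    rw [List.foldl_cons]
    have hcn : rem.contains n = true := hin n (List.mem_cons_self ..)
    have hodn : od.contains n = false := hout n (List.mem_cons_self ..)
    have hnmem : n ∉ L := (List.nodup_cons.mp hL).1
    have hL' : L.Nodup := (List.nodup_cons.mp hL).2
    have hout' : ∀ m ∈ L, (od.insert n (rem.getD n "")).contains m = false := by
      intro m hm
      have hmn : ¬ (m = n) := fun hh => hnmem (hh ▸ hm)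
      rw [PySem.Dict.contains_insert]
      simp [hmn, hout m (List.mem_cons_of_mem _ hm)]
    by_cases hidx : index.contains n
    · have hstep : bStep index (od, rem) n = (od.insert n (rem.getD n ""), rem.erase n) := by
        simp [bStep, hidx, pop?_of_contains rem hcn]
      rw [hstep]
      have hnd' := nodup_keys_erase rem n hnd
      have hin' : ∀ m ∈ L, (rem.erase n).contains m = true := by
        intro m hm
        have hmn : m ≠ n := fun hh => hnmem (hh ▸ hm)
        rw [contains_erase_of_ne _ hmn]
        exact hin m (List.mem_cons_of_mem _ hm)
      rw [ih _ _ hnd' hL' hin' hout']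
      rw [PySem.Dict.items_insert_of_not_contains _ _ hodn]
      have hmap : L.map (fun m => (m, (rem.erase n).getD m "")) = L.map (fun m => (m, rem.getD m "")) := by
        apply List.map_congr_left
        intro m hm
        have hmn : m ≠ n := fun hh => hnmem (hh ▸ hm)
        rw [getD_erase_of_ne _ hmn]
      rw [hmap]
      simp [List.append_assoc]
    · have hstep : bStep index (od, rem) n = (od.insert n (rem.getD n ""), rem) := by
        simp [bStep, hidx]
      rw [hstep, ih _ _ hnd hL' (fun m hm => hin m (List.mem_cons_of_mem _ hm)) hout']
      rw [PySem.Dict.items_insert_of_not_contains _ _ hodn]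
      simp [List.append_assoc]

theorem chain_fst_perm (S : List String) (rem : PySem.Dict String String)
    (hnd : rem.keys.Nodup) : ((chain rem S).map Prod.fst).Perm rem.keys := by
  induction S generalizing rem with
  | nil =>
    simpa [chain, List.map_map, Function.comp_def] using
      (PySem.List.sorted_perm rem.keys (fun n => n) false)
  | cons n S ih =>
    by_cases hc : rem.contains n
    · have hmem : n ∈ rem.keys := (PySem.Dict.contains_iff_mem_keys _ _).mp hc
      have hnd' := nodup_keys_erase rem n hnd
      have hkeys : (rem.erase n).keys = rem.keys.erase n := by
        rw [keys_erase_dict, hnd.erase_eq_filter n]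
        apply List.filter_congr
        intro x _
        simp [bne]
      have hperm : ((chain (rem.erase n) S).map Prod.fst).Perm (rem.keys.erase n) :=
        hkeys ▸ ih (rem.erase n) hnd'
      simp only [chain, hc, if_pos, List.map_cons]
      exact (hperm.cons n).trans (List.perm_cons_erase hmem).symm
    · simpa [chain, hc] using ih rem hnd

theorem chain_vals (S : List String) (F rem : PySem.Dict String String)
    (hnd : rem.keys.Nodup) (hv : ∀ n, rem.contains n = true → rem.getD n "" = F.getD n "") :
    chain rem S = ((chain rem S).map Prod.fst).map (fun n => (n, F.getD n "")) := by
  induction S generalizing rem with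
  | nil =>
    simp only [chain, List.map_map]
    apply List.map_congr_left
    intro m hm
    have hcm : rem.contains m = true := (PySem.Dict.contains_iff_mem_keys _ _).mpr
      ((PySem.List.mem_sorted _ _ _ _).mp hm)
    simp [Function.comp_def, hv m hcm]
  | cons n S ih =>
    by_cases hc : rem.contains n
    · have hnd' := nodup_keys_erase rem n hnd
      have hv' : ∀ m, (rem.erase n).contains m = true → (rem.erase n).getD m "" = F.getD m "" := by
        intro m hm
        by_cases hmn : m = n
        · rw [hmn, contains_erase_self] at hm; cases hm
        · rw [getD_erase_of_ne _ hmn]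
          exact hv m (by rw [← contains_erase_of_ne rem hmn]; exact hm)
      simpa [chain, hc, hv n hc] using ih (rem.erase n) hnd' hv'
    · simpa [chain, hc] using ih rem hnd hv

theorem chain_pairwise (S S₀ : List String) (rem : PySem.Dict String String)
    (hnd : rem.keys.Nodup) (h0 : ∀ n, rem.contains n = true → n ∉ S₀) :
    ((chain rem S).map Prod.fst).Pairwise
      (fun a b => lexKey (S₀ ++ S) a < lexKey (S₀ ++ S) b) := by
  induction S generalizing S₀ rem with
  | nil =>
    have hfst : (chain rem []).map Prod.fst = PySem.List.sorted rem.keys (fun n => n) false := by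
      simp [chain, List.map_map, Function.comp_def]
    rw [hfst, List.append_nil]
    have hnd2 : (PySem.List.sorted rem.keys (fun n => n) false).Nodup :=
      (PySem.List.sorted_perm _ _ _).symm.nodup hnd
    have hlt : (PySem.List.sorted rem.keys (fun n => n) false).Pairwise (fun a b => a < b) :=
      ((PySem.List.sorted_pairwise rem.keys (fun n => n)).and hnd2).imp
        (fun h => lt_of_le_of_ne h.1 h.2)
    refine hlt.imp_of_mem ?_
    intro a b ha hb hab
    have hca : rem.contains a = true := (PySem.Dict.contains_iff_mem_keys _ _).mpr
      ((PySem.List.mem_sorted _ _ _ _).mp ha)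
    have hcb : rem.contains b = true := (PySem.Dict.contains_iff_mem_keys _ _).mpr
      ((PySem.List.mem_sorted _ _ _ _).mp hb)
    have hfa : firstIdx S₀ a = (S₀.length : Int) := by
      have hx : PySem.List.index? S₀ a = none := (PySem.List.index?_eq_none_iff _ _).mpr (h0 a hca)
      unfold firstIdx
      rw [hx]
    have hfb : firstIdx S₀ b = (S₀.length : Int) := by
      have hx : PySem.List.index? S₀ b = none := (PySem.List.index?_eq_none_iff _ _).mpr (h0 b hcb)
      unfold firstIdx
      rw [hx]
    exact Prod.Lex.toLex_lt_toLex.mpr (Or.inr ⟨by rw [hfa, hfb], hab⟩)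
  | cons n S ih =>
    by_cases hc : rem.contains n
    · have hnd' := nodup_keys_erase rem n hnd
      have h0' : ∀ m, (rem.erase n).contains m = true → m ∉ (S₀ ++ [n]) := by
        intro m hm
        by_cases hmn : m = n
        · rw [hmn, contains_erase_self] at hm; cases hm
        · have hmS : m ∉ S₀ := h0 m (by rw [← contains_erase_of_ne rem hmn]; exact hm)
          simp [hmn, hmS]
      have hrec := ih (S₀ ++ [n]) (rem.erase n) hnd' h0'
      rw [List.append_assoc, List.singleton_append] at hrec
      simp only [chain, hc, if_pos, List.map_cons]
      rw [List.pairwise_cons]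
      refine ⟨?_, hrec⟩
      intro b hb
      have hbk : b ∈ (rem.erase n).keys := (chain_fst_perm S _ hnd').subset hb
      have hcbe : (rem.erase n).contains b = true := (PySem.Dict.contains_iff_mem_keys _ _).mpr hbk
      have hbn : b ≠ n := by
        intro hh
        rw [hh, contains_erase_self] at hcbe
        cases hcbe
      have hcb : rem.contains b = true := by rw [← contains_erase_of_ne rem hbn]; exact hcbe
      have hbS0 : b ∉ S₀ := h0 b hcb
      have hfn : firstIdx (S₀ ++ n :: S) n = (S₀.length : Int) := by
        unfold firstIdx
        rw [index?_append_of_not_mem _ (h0 n hc), PySem.List.index?_cons_self]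
        simp
      have hfb : (S₀.length : Int) < firstIdx (S₀ ++ n :: S) b := by
        unfold firstIdx
        rw [index?_append_of_not_mem _ hbS0, PySem.List.index?_cons_of_ne _ (fun hh => hbn hh.symm)]
        cases PySem.List.index? S b <;> simp <;> omega
      exact Prod.Lex.toLex_lt_toLex.mpr (Or.inl (by rw [hfn]; exact hfb))
    · have h0' : ∀ m, rem.contains m = true → m ∉ (S₀ ++ [n]) := by
        intro m hm
        have hmn : m ≠ n := by
          intro hh
          rw [hh] at hm
          rw [hm] at hc
          exact hc rfl
        simp [hmn, h0 m hm]
      have hrec := ih (S₀ ++ [n]) rem hnd h0'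
      rw [List.append_assoc, List.singleton_append] at hrec
      simpa [chain, hc] using hrec

-- ===== VERDICT (by name: the statement is the Claim_ definition above) =====
theorem order_fields_spec : Claim_equal_order_fields := by
  intro fields sf _ hpre
  obtain ⟨hnd0, -⟩ := hpre
  unfold Spec_order_fields
  have hndF : (PySem.Dict.mk fields : PySem.Dict String String).keys.Nodup := by
    simpa [PySem.Dict.keys] using hnd0
  -- A computes chain
  have hA : order_fields fields sf = chain (PySem.Dict.mk fields) (sf.map pvName) := by
    have h := afold_chain (sf.map pvName) PySem.Dict.empty (PySem.Dict.mk fields) hndF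
      (fun n _ => PySem.Dict.contains_empty n)
    rw [List.foldl_map] at h
    simpa [order_fields, popStep, PySem.Dict.empty] using h
  -- B computes the sorted key list mapped through the original dict
  have hB0 : order_fields_alt fields sf
      = (((PySem.List.sorted2 (PySem.Dict.mk fields : PySem.Dict String String).keys
            (fun n => ((PySem.List.enumerate sf).foldl (fun d p => d.setdefault (pvName p.2) p.1)
              PySem.Dict.empty).getD n (Int.ofNat sf.length)) (fun n => n) false).foldl
          (bStep ((PySem.List.enumerate sf).foldl (fun d p => d.setdefault (pvName p.2) p.1)
            PySem.Dict.empty))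
          (PySem.Dict.empty, PySem.Dict.mk fields)).1).items := rfl
  have hB : order_fields_alt fields sf
      = (PySem.List.sorted (PySem.Dict.mk fields : PySem.Dict String String).keys
          (fun n => toLex (firstIdx (sf.map pvName) n, n)) false).map
          (fun n => (n, (PySem.Dict.mk fields : PySem.Dict String String).getD n "")) := by
    rw [hB0, k1_eq, sorted2_eq_sorted_lex]
    have hLnd : (PySem.List.sorted (PySem.Dict.mk fields : PySem.Dict String String).keys
        (fun n => toLex (firstIdx (sf.map pvName) n, n)) false).Nodup :=
      (PySem.List.sorted_perm _ _ _).symm.nodup hndF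
    have hin : ∀ n ∈ PySem.List.sorted (PySem.Dict.mk fields : PySem.Dict String String).keys
        (fun n => toLex (firstIdx (sf.map pvName) n, n)) false,
        (PySem.Dict.mk fields : PySem.Dict String String).contains n = true := fun n hn =>
      (PySem.Dict.contains_iff_mem_keys _ _).mpr ((PySem.List.mem_sorted _ _ _ _).mp hn)
    have h := bfold_items
      ((PySem.List.enumerate sf).foldl (fun d p => d.setdefault (pvName p.2) p.1) PySem.Dict.empty)
      (PySem.List.sorted (PySem.Dict.mk fields : PySem.Dict String String).keys
        (fun n => toLex (firstIdx (sf.map pvName) n, n)) false)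
      PySem.Dict.empty (PySem.Dict.mk fields) hndF hLnd hin
      (fun n _ => PySem.Dict.contains_empty n)
    simpa using h
  have hsort : PySem.List.sorted (PySem.Dict.mk fields : PySem.Dict String String).keys
      (fun n => toLex (firstIdx (sf.map pvName) n, n)) false
      = (chain (PySem.Dict.mk fields) (sf.map pvName)).map Prod.fst := by
    apply PySem.List.sorted_eq_of_perm_of_pairwise_lt
    · exact chain_fst_perm (sf.map pvName) _ hndF
    · have h := chain_pairwise (sf.map pvName) [] (PySem.Dict.mk fields) hndF (by intro n _; simp)
      simpa [lexKey] using h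
  rw [hA, hB, hsort,
    ← chain_vals (sf.map pvName) (PySem.Dict.mk fields) (PySem.Dict.mk fields) hndF (fun n _ => rfl)]
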